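-- pv_equiv track=rewrite | github.com/bhavikam28/aegis-iam | agent/features/validation/security_validator.py | _categorize_dynamo_operations
-- ===== SOURCE A (Python) =====
-- def _categorize_dynamo_operations(actions):
--     """Categorize DynamoDB operations by type"""
--     categories = {
--         'Read': set(),
--         'Write': set(),
--         'Admin': set()
--     }
--
--     for action in actions:
--         if action.startswith(('Get', 'Query', 'Scan')):
--             categories['Read'].add(action)
--         elif action.startswith(('Put', 'Update', 'Delete')):
--             categories['Write'].add(action)
--         else:
--             categories['Admin'].add(action)
--
--     return {k:v for k,v in categories.items() if v}
-- ===== SOURCE B (Python) =====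
-- _PREFIX_TABLE = (('Read', ('Get', 'Query', 'Scan')), ('Write', ('Put', 'Update', 'Delete')))
--
--
-- def _category(action):
--     for name, prefixes in _PREFIX_TABLE:
--         if action.startswith(prefixes):
--             return name
--     return 'Admin'
--
--
-- def _categorize_dynamo_operations(actions):
--     result = {}
--     for name in ('Read', 'Write', 'Admin'):
--         members = {a for a in actions if _category(a) == name}
--         if members:
--             result[name] = members
--     return result
-- ===== Notes on version B (the rewrite author's own statement) =====
-- stated objective: alternative
-- what changed: B replaces A's single dispatch loop with hard-coded if/elif dict branches by a data-driven prefix table plus a per-action classifier function, building each category with its own set-comprehension pass and inserting only non-empty categories in fixed Read/Write/Admin order (no final empty-filter).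
import Mathlib
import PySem

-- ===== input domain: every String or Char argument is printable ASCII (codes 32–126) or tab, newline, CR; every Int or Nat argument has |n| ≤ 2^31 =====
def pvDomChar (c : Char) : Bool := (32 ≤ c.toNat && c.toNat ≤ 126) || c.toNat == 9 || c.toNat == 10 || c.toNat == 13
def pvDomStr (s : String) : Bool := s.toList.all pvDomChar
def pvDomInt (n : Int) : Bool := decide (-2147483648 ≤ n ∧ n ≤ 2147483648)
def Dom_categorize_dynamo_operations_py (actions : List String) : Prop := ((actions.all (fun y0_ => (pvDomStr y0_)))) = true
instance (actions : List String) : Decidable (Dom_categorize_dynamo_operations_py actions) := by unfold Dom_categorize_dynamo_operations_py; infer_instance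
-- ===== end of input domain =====

-- B replaces A's three hard-coded dict branches by a prefix-table classifier and one
-- comprehension pass per category (same values; alternative decomposition, not claimed faster).
-- ===== PORT A =====
-- tuple startswith: action.startswith((p1,p2,p3)) is true iff any single prefix matches (exact)
def pvStarts3 (s p1 p2 p3 : String) : Bool :=
  PySem.Str.startswith s p1 || PySem.Str.startswith s p2 || PySem.Str.startswith s p3

def categorize_dynamo_operations_py (actions : List String) : List (String × List String) :=
  let categories : PySem.Dict String (PySem.Set String) :=
    PySem.Dict.ofList [("Read", PySem.Set.empty), ("Write", PySem.Set.empty), ("Admin", PySem.Set.empty)]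
  let categories := actions.foldl (fun d action =>
    if pvStarts3 action "Get" "Query" "Scan" then
      d.modify "Read" PySem.Set.empty (fun s => PySem.Set.add s action)
    else if pvStarts3 action "Put" "Update" "Delete" then
      d.modify "Write" PySem.Set.empty (fun s => PySem.Set.add s action)
    else
      d.modify "Admin" PySem.Set.empty (fun s => PySem.Set.add s action)) categories
  categories.items.filter (fun kv => !kv.2.isEmpty)

-- ===== PORT B =====
def pvTable : List (String × (String × String × String)) :=
  [("Read", ("Get", "Query", "Scan")), ("Write", ("Put", "Update", "Delete"))]

-- the for/return loop over the table: first matching row's name, else 'Admin'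
def pvCategory (action : String) : String :=
  match pvTable.find? (fun t => pvStarts3 action t.2.1 t.2.2.1 t.2.2.2) with
  | some t => t.1
  | none => "Admin"

def categorize_dynamo_operations_py_alt (actions : List String) : List (String × List String) :=
  ["Read", "Write", "Admin"].foldl (fun result name =>
    let members := PySem.Set.ofList (actions.filter (fun a => pvCategory a == name))
    if members.isEmpty then result else result ++ [(name, members)]) []

-- ===== PRECONDITION & SPEC =====
def Spec_categorize_dynamo_operations_py (actions : List String) (out : List (String × List String)) : Prop := out = categorize_dynamo_operations_py_alt actions
instance (actions : List String) (out : List (String × List String)) : Decidable (Spec_categorize_dynamo_operations_py actions out) := by unfold Spec_categorize_dynamo_operations_py; infer_instance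

-- ===== CLAIM (what is proved, stated in full; the proofs are below) =====
def Claim_equal_categorize_dynamo_operations_py : Prop := ∀ (actions : List String), Dom_categorize_dynamo_operations_py actions → Spec_categorize_dynamo_operations_py actions (categorize_dynamo_operations_py actions)

-- ===== LEMMAS AND PROOFS =====
-- the three classification predicates (A's if / elif / else branches)
def fR (x : String) : Bool := pvStarts3 x "Get" "Query" "Scan"
def fW (x : String) : Bool := !fR x && pvStarts3 x "Put" "Update" "Delete"
def fA (x : String) : Bool := !fR x && !pvStarts3 x "Put" "Update" "Delete"

lemma cat_read (a : String) : (pvCategory a == "Read") = fR a := by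
  by_cases h1 : pvStarts3 a "Get" "Query" "Scan" = true <;>
    by_cases h2 : pvStarts3 a "Put" "Update" "Delete" = true <;>
      simp [pvCategory, pvTable, List.find?, fR, h1, h2]

lemma cat_write (a : String) : (pvCategory a == "Write") = fW a := by
  by_cases h1 : pvStarts3 a "Get" "Query" "Scan" = true <;>
    by_cases h2 : pvStarts3 a "Put" "Update" "Delete" = true <;>
      simp [pvCategory, pvTable, List.find?, fR, fW, h1, h2]

lemma cat_admin (a : String) : (pvCategory a == "Admin") = fA a := by
  by_cases h1 : pvStarts3 a "Get" "Query" "Scan" = true <;>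
    by_cases h2 : pvStarts3 a "Put" "Update" "Delete" = true <;>
      simp [pvCategory, pvTable, List.find?, fR, fA, h1, h2]

lemma foldA (l : List String) (r w a : PySem.Set String) :
    l.foldl (fun d action =>
      if pvStarts3 action "Get" "Query" "Scan" then
        d.modify "Read" PySem.Set.empty (fun s => PySem.Set.add s action)
      else if pvStarts3 action "Put" "Update" "Delete" then
        d.modify "Write" PySem.Set.empty (fun s => PySem.Set.add s action)
      else
        d.modify "Admin" PySem.Set.empty (fun s => PySem.Set.add s action))
      (PySem.Dict.mk [("Read", r), ("Write", w), ("Admin", a)]) =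
    PySem.Dict.mk [("Read", PySem.Set.update r (l.filter fR)),
                   ("Write", PySem.Set.update w (l.filter fW)),
                   ("Admin", PySem.Set.update a (l.filter fA))] := by
  induction l generalizing r w a with
  | nil => rfl
  | cons x xs ih =>
    by_cases h1 : pvStarts3 x "Get" "Query" "Scan" = true
    · have e1 : List.filter fR (x :: xs) = x :: List.filter fR xs := by simp [fR, h1]
      have e2 : List.filter fW (x :: xs) = List.filter fW xs := by simp [fW, fR, h1]
      have e3 : List.filter fA (x :: xs) = List.filter fA xs := by simp [fA, fR, h1]
      rw [List.foldl_cons, if_pos h1,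
        show ((PySem.Dict.mk [("Read", r), ("Write", w), ("Admin", a)]).modify
            "Read" PySem.Set.empty (fun s => PySem.Set.add s x)) =
          PySem.Dict.mk [("Read", PySem.Set.add r x), ("Write", w), ("Admin", a)] from rfl,
        ih, e1, e2, e3]
      rfl
    · by_cases h2 : pvStarts3 x "Put" "Update" "Delete" = true
      · have e1 : List.filter fR (x :: xs) = List.filter fR xs := by simp [fR, h1]
        have e2 : List.filter fW (x :: xs) = x :: List.filter fW xs := by simp [fW, fR, h1, h2]
        have e3 : List.filter fA (x :: xs) = List.filter fA xs := by simp [fA, fR, h1, h2]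
        rw [List.foldl_cons, if_neg h1, if_pos h2,
          show ((PySem.Dict.mk [("Read", r), ("Write", w), ("Admin", a)]).modify
              "Write" PySem.Set.empty (fun s => PySem.Set.add s x)) =
            PySem.Dict.mk [("Read", r), ("Write", PySem.Set.add w x), ("Admin", a)] from rfl,
          ih, e1, e2, e3]
        rfl
      · have e1 : List.filter fR (x :: xs) = List.filter fR xs := by simp [fR, h1]
        have e2 : List.filter fW (x :: xs) = List.filter fW xs := by simp [fW, fR, h1, h2]
        have e3 : List.filter fA (x :: xs) = x :: List.filter fA xs := by simp [fA, fR, h1, h2]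
        rw [List.foldl_cons, if_neg h1, if_neg h2,
          show ((PySem.Dict.mk [("Read", r), ("Write", w), ("Admin", a)]).modify
              "Admin" PySem.Set.empty (fun s => PySem.Set.add s x)) =
            PySem.Dict.mk [("Read", r), ("Write", w), ("Admin", PySem.Set.add a x)] from rfl,
          ih, e1, e2, e3]
        rfl

-- ===== VERDICT (by name: the statement is the Claim_ definition above) =====
theorem categorize_dynamo_operations_py_spec : Claim_equal_categorize_dynamo_operations_py := by
  intro actions _
  show categorize_dynamo_operations_py actions = categorize_dynamo_operations_py_alt actions
  simp only [categorize_dynamo_operations_py, categorize_dynamo_operations_py_alt]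
  rw [show (PySem.Dict.ofList
      [("Read", (PySem.Set.empty : PySem.Set String)), ("Write", PySem.Set.empty),
       ("Admin", PySem.Set.empty)]) =
      PySem.Dict.mk [("Read", PySem.Set.empty), ("Write", PySem.Set.empty),
       ("Admin", PySem.Set.empty)] from rfl, foldA]
  simp only [List.foldl_cons, List.foldl_nil, List.filter_cons, List.filter_nil]
  rw [List.filter_congr (fun a _ => cat_read a), List.filter_congr (fun a _ => cat_write a),
    List.filter_congr (fun a _ => cat_admin a)]
  by_cases hr : (PySem.Set.ofList (actions.filter fR)).isEmpty = true <;>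
    by_cases hw : (PySem.Set.ofList (actions.filter fW)).isEmpty = true <;>
      by_cases ha : (PySem.Set.ofList (actions.filter fA)).isEmpty = true <;>
        simp [hr, hw, ha, PySem.Set.update_nil_left]
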